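-- pv_equiv track=rewrite | github.com/uol-feps-soc-comp3931-project-2425/individual-project-avalyni | three-colourable_(triangle,theta)-free_graphs/algorithms/decomposition.py | is_valid_ordering
-- ===== SOURCE A (Python) =====
-- def is_valid_ordering(ordering, graph):
--
--     """
--     Verifies whether a given vertex ordering satisfies the required constraints.
--
--     Parameters:
--         ordering (list): A list of nodes representing a vertex ordering.
--         graph (dict): An adjacency list representation of the graph.
--
--     Returns:
--         bool: True if the ordering satisfies the constraints, False otherwise.
--
--     Constraints:
--         - All nodes in the graph must be included in the ordering.
--         - Each node should have at most two earlier neighbours in the ordering (This ensures that the ordering follows a structure suitable for greedy colouring).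
--     """
--
--     if set(ordering) != set(graph.keys()):  # Ensure all nodes are included
--         return False
--
--     earlier_nodes = set()
--     for node in ordering:
--         earlier_neighbours = {nbr for nbr in graph[node] if nbr in earlier_nodes}
--         if len(earlier_neighbours) > 2:
--             return False # Invalid ordering, more than two earlier neighbours
--         earlier_nodes.add(node) # Mark node as processed
--
--     return True # This ordering is valid
-- ===== SOURCE B (Python) =====
-- def is_valid_ordering(ordering, graph):
--     if set(ordering) != set(graph.keys()):  # Ensure all nodes are included
--         return False
--     pos = {node: i for i, node in enumerate(ordering)}
--     return all(
--         len({n for n in nbrs if n in pos and pos[n] < pos[node]}) <= 2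
--         for node, nbrs in graph.items()
--     )
-- ===== Notes on version B (the rewrite author's own statement) =====
-- stated objective: alternative
-- what changed: B replaces A's incremental scan with a growing earlier-nodes set by a precomputed position table (node -> index) and one pass over the graph's adjacency lists counting neighbours with a smaller position; Pre_ excludes orderings that list a node more than once, where A's per-occurrence re-checking against the growing prefix is an artefact of its scan and either verdict is defensible for such a degenerate 'ordering'.
-- outside the precondition, e.g. on is_valid_ordering([1, 0, 2, 1], {0: [2, 1, 2, 0], 1: [2, 2, 0, 1], 2: [2, 0, 0]}): A returns False, B returns True
import Mathlib
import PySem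

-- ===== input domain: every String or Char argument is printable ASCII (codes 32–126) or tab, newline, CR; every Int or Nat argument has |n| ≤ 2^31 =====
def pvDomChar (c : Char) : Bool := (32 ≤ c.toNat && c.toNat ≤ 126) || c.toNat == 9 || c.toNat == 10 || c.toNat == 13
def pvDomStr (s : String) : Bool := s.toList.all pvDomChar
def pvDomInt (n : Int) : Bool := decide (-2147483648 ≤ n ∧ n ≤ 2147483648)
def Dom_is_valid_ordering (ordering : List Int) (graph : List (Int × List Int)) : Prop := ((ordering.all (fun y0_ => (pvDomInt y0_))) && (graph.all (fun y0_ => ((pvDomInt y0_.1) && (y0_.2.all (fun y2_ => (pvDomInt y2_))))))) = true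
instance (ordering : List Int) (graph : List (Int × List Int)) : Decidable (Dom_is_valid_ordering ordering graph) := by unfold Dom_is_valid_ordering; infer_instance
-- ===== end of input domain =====

-- B replaces A's incremental growing-set scan by a precomputed position table plus one pass over
-- the adjacency lists (alternative decomposition, no speed claim). Both are total; Pre_ restricts
-- to duplicate-free orderings (see Pre_ below).

-- ===== PORT A =====
-- the for-loop over the ordering with early return False; 'graph[node]' is always found because the
-- set-equality guard has passed (node ∈ ordering ⇒ node ∈ keys), so the getD default [] is unreachable
def aLoop (g : PySem.Dict Int (List Int)) : List Int → PySem.Set Int → Bool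
  | [], _ => true
  | node :: rest, earlier =>
    let earlier_neighbours : PySem.Set Int :=
      PySem.Set.ofList (((g.get? node).getD []).filter (fun nbr => PySem.Set.contains earlier nbr))
    if 2 < earlier_neighbours.length then false
    else aLoop g rest (PySem.Set.add earlier node)

def is_valid_ordering (ordering : List Int) (graph : List (Int × List Int)) : Bool :=
  let g := PySem.Dict.ofList graph
  if !(PySem.Set.equal (PySem.Set.ofList ordering) (PySem.Set.ofList g.keys)) then false
  else aLoop g ordering PySem.Set.empty

-- ===== PORT B =====
-- 'pos[node]' is always found because the guard has passed (node ∈ keys ⇒ node ∈ ordering),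
-- so the getD default 0 is unreachable; 'pos[n]' is guarded by 'n in pos' as in Source B
def is_valid_ordering_alt (ordering : List Int) (graph : List (Int × List Int)) : Bool :=
  let g := PySem.Dict.ofList graph
  if !(PySem.Set.equal (PySem.Set.ofList ordering) (PySem.Set.ofList g.keys)) then false
  else
    let pos : PySem.Dict Int Int :=
      (PySem.List.enumerate ordering 0).foldl (fun d p => d.insert p.2 p.1) PySem.Dict.empty
    g.items.all (fun q =>
      (PySem.Set.ofList (q.2.filter (fun n =>
        pos.contains n && decide ((pos.get? n).getD 0 < (pos.get? q.1).getD 0)))).length ≤ 2)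

-- ===== PRECONDITION & SPEC =====
-- Pre_ excludes orderings that list a node more than once: A re-checks every occurrence against the
-- growing prefix while B checks each node once at its recorded position, and on such a degenerate
-- 'ordering' (accepted only because A's guard compares sets) either verdict is defensible.
def Pre_is_valid_ordering (ordering : List Int) (graph : List (Int × List Int)) : Prop :=
  ordering.Nodup
instance (ordering : List Int) (graph : List (Int × List Int)) : Decidable (Pre_is_valid_ordering ordering graph) := by unfold Pre_is_valid_ordering; infer_instance

def pvWitness_is_valid_ordering : List Int × (List (Int × List Int)) :=
  ([1, 2, 3], [(1, [2]), (2, [1, 3]), (3, [2])])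

def Spec_is_valid_ordering (ordering : List Int) (graph : List (Int × List Int)) (out : Bool) : Prop := out = is_valid_ordering_alt ordering graph
instance (ordering : List Int) (graph : List (Int × List Int)) (out : Bool) : Decidable (Spec_is_valid_ordering ordering graph out) := by unfold Spec_is_valid_ordering; infer_instance

-- ===== CLAIM (what is proved, stated in full; the proofs are below) =====
def Claim_equal_is_valid_ordering : Prop := ∀ (ordering : List Int) (graph : List (Int × List Int)), Dom_is_valid_ordering ordering graph → Pre_is_valid_ordering ordering graph → Spec_is_valid_ordering ordering graph (is_valid_ordering ordering graph)

-- ===== LEMMAS AND PROOFS =====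

-- number of distinct elements common to nbrs and pre (the quantity both programs bound by 2)
def pvCard (nbrs pre : List Int) : Nat := (nbrs.toFinset ∩ pre.toFinset).card

-- a set comprehension filtering by (decidable) membership in pre counts exactly pvCard
lemma pv_len_filter (nbrs pre : List Int) (p : Int → Bool)
    (hp : ∀ x ∈ nbrs, p x = true ↔ x ∈ pre) :
    (PySem.Set.ofList (nbrs.filter p)).length = pvCard nbrs pre := by
  have hnd := PySem.Set.nodup_ofList (nbrs.filter p)
  rw [← List.toFinset_card_of_nodup hnd]
  unfold pvCard
  congr 1
  ext x
  simp only [List.mem_toFinset, PySem.Set.mem_ofList, List.mem_filter, Finset.mem_inter]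
  constructor
  · rintro ⟨hx, hpx⟩; exact ⟨hx, (hp x hx).mp hpx⟩
  · rintro ⟨hx, hmem⟩; exact ⟨hx, (hp x hx).mpr hmem⟩

-- characterization of A's loop: all steps pass, each occurrence checked against what came before it
lemma aLoop_iff (g : PySem.Dict Int (List Int)) :
    ∀ (l pre : List Int),
      aLoop g l (PySem.Set.ofList pre) = true ↔
        ∀ i (hi : i < l.length), pvCard ((g.get? l[i]).getD []) (pre ++ l.take i) ≤ 2 := by
  intro l
  induction l with
  | nil => intro pre; simp [aLoop]
  | cons node rest ih =>
    intro pre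
    rw [show aLoop g (node :: rest) (PySem.Set.ofList pre)
        = (if 2 < (PySem.Set.ofList (((g.get? node).getD []).filter
              (fun nbr => PySem.Set.contains (PySem.Set.ofList pre) nbr))).length then false
           else aLoop g rest (PySem.Set.add (PySem.Set.ofList pre) node)) from rfl]
    rw [← PySem.Set.ofList_append_singleton,
        pv_len_filter _ pre _ (by intro x _; simp [PySem.Set.contains, PySem.Set.mem_ofList])]
    by_cases hc : 2 < pvCard ((g.get? node).getD []) pre
    · simp only [if_pos hc]
      constructor
      · intro h; exact absurd h (by simp)
      · intro h
        have := h 0 (by simp)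
        simp at this
        omega
    · simp only [if_neg hc]
      rw [ih]
      constructor
      · intro h i hi
        cases i with
        | zero => simpa using Nat.le_of_not_lt hc
        | succ k =>
          have hk : k < rest.length := by simpa using hi
          have := h k hk
          simpa [List.append_assoc] using this
      · intro h k hk
        have := h (k + 1) (by simpa using Nat.succ_lt_succ hk)
        simpa [List.append_assoc] using this

-- the position table built by B's dict comprehension
def pvPos (o : List Int) : PySem.Dict Int Int :=
  (PySem.List.enumerate o 0).foldl (fun d p => d.insert p.2 p.1) PySem.Dict.empty

lemma pvPos_keys (o : List Int) : (pvPos o).keys = PySem.Set.ofList o := by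
  unfold pvPos
  rw [PySem.Dict.keys_foldl_insert_key (key := fun p : Int × Int => p.2)]
  rw [PySem.List.map_snd_enumerate]
  simp [PySem.Set.update_nil_left, PySem.Dict.keys_empty]

lemma pvPos_contains (o : List Int) (x : Int) : (pvPos o).contains x = true ↔ x ∈ o := by
  rw [PySem.Dict.contains_iff_mem_keys, pvPos_keys, PySem.Set.mem_ofList]

lemma pvPos_get (o : List Int) (h : o.Nodup) (i : Nat) (hi : i < o.length) :
    (pvPos o).get? o[i] = some (i : Int) := by
  have hitems : (pvPos o).items =
      PySem.Dict.empty.items ++ (PySem.List.enumerate o 0).map (fun p => (p.2, p.1)) := by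
    unfold pvPos
    exact PySem.Dict.items_foldl_insert_fresh (PySem.List.enumerate o 0)
      (k := fun p => p.2) (v := fun p => p.1) PySem.Dict.empty
      (by intro a _; exact PySem.Dict.contains_empty _)
      (by rw [PySem.List.map_snd_enumerate]; exact h)
  have hnd : (pvPos o).keys.Nodup := by
    rw [pvPos_keys]; exact PySem.Set.nodup_ofList o
  apply PySem.Dict.get?_of_mem_items _ _ hnd
  rw [hitems]
  simp only [PySem.Dict.empty, List.nil_append, List.mem_map]
  refine ⟨((i : Int), o[i]), ?_, rfl⟩
  rw [PySem.List.mem_enumerate_iff]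
  exact ⟨i, hi, by simp⟩

-- with a duplicate-free ordering, B's filter condition for the node at index i is membership in take i
lemma pv_b_filter (o : List Int) (h : o.Nodup) (i : Nat) (hi : i < o.length) (n : Int) :
    ((pvPos o).contains n && decide (((pvPos o).get? n).getD 0 < ((pvPos o).get? o[i]).getD 0)) = true
      ↔ n ∈ o.take i := by
  rw [pvPos_get o h i hi]
  by_cases hn : n ∈ o
  · obtain ⟨j, hj, hjn⟩ := List.getElem_of_mem hn
    subst hjn
    rw [pvPos_get o h j hj]
    simp only [Option.getD_some]
    constructor
    · intro hb
      simp only [Bool.and_eq_true, decide_eq_true_eq] at hb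
      have hji : j < i := by exact_mod_cast hb.2
      exact List.mem_take_iff_getElem.mpr ⟨j, by omega, rfl⟩
    · intro hmem
      obtain ⟨k, hk, hkn⟩ := List.mem_take_iff_getElem.mp hmem
      have hk' : k < o.length := by omega
      have : k = j := by
        have hkn' : o[k] = o[j] := by simpa using hkn
        exact (List.Nodup.getElem_inj_iff h).mp hkn'
      subst this
      simp only [Bool.and_eq_true, decide_eq_true_eq]
      refine ⟨(pvPos_contains o o[k]).mpr (List.getElem_mem hk'), by exact_mod_cast (by omega : k < i)⟩
  · constructor
    · intro hb
      simp only [Bool.and_eq_true] at hb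
      exact absurd ((pvPos_contains o n).mp hb.1) hn
    · intro hmem
      exact absurd (List.mem_of_mem_take hmem) hn

-- the guard is the same expression in both ports; under it, node sets agree
lemma pv_guard_mem {ordering : List Int} {g : PySem.Dict Int (List Int)}
    (h : PySem.Set.equal (PySem.Set.ofList ordering) (PySem.Set.ofList g.keys) = true) :
    ∀ x, x ∈ ordering ↔ x ∈ g.keys := by
  intro x
  have := (PySem.Set.equal_iff _ _).mp h x
  simpa [PySem.Set.mem_ofList] using this

-- ===== VERDICT (by name: the statement is the Claim_ definition above) =====
theorem is_valid_ordering_spec : Claim_equal_is_valid_ordering := by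
  intro ordering graph _ hpre
  unfold Spec_is_valid_ordering is_valid_ordering is_valid_ordering_alt
  set g := PySem.Dict.ofList graph with hg
  by_cases hguard : PySem.Set.equal (PySem.Set.ofList ordering) (PySem.Set.ofList g.keys) = true
  · simp only [hguard, Bool.not_true, Bool.false_eq_true, if_false]
    have hmem := pv_guard_mem hguard
    have hnd : g.keys.Nodup := PySem.Dict.nodup_keys_ofList graph
    have hempty : (PySem.Set.empty : PySem.Set Int) = PySem.Set.ofList [] := rfl
    rw [hempty]
    rw [Bool.eq_iff_iff, aLoop_iff, List.all_eq_true]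
    constructor
    · -- A passes ⇒ B passes
      intro hA q hq
      have hkey : q.1 ∈ g.keys := PySem.Dict.mem_keys_of_mem_items g hq
      have hord : q.1 ∈ ordering := (hmem q.1).mpr hkey
      obtain ⟨i, hi, hin⟩ := List.getElem_of_mem hord
      have hv : g.get? q.1 = some q.2 := PySem.Dict.get?_of_mem_items g hq hnd
      have hAi := hA i hi
      rw [hin, hv] at hAi
      simp only [Option.getD_some, List.nil_append] at hAi
      simp only [decide_eq_true_eq]
      rw [pv_len_filter q.2 (ordering.take i) _ (by intro x _; rw [← hin]; exact pv_b_filter ordering hpre i hi x)]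
      exact hAi
    · -- B passes ⇒ A passes
      intro hB i hi
      set node := ordering[i] with hnode
      have hord : node ∈ ordering := List.getElem_mem hi
      have hkey : node ∈ g.keys := (hmem node).mp hord
      obtain ⟨v, hv⟩ : ∃ v, g.get? node = some v := by
        have hc : g.contains node = true := (PySem.Dict.contains_iff_mem_keys g node).mpr hkey
        rw [PySem.Dict.contains_eq_isSome_get?] at hc
        exact Option.isSome_iff_exists.mp hc
      have hitem : (node, v) ∈ g.items := PySem.Dict.mem_items_of_get?_eq_some g hv
      have hBq := hB (node, v) hitem
      simp only [decide_eq_true_eq] at hBq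
      rw [pv_len_filter v (ordering.take i) _ (by intro x _; exact pv_b_filter ordering hpre i hi x)] at hBq
      rw [hv]
      simpa using hBq
  · simp only [Bool.not_eq_true] at hguard
    simp [hguard]
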